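-- pv_equiv track=rewrite | github.com/emptyCartridge/verify_receipts | app/verifier/verifier_main.py | find_match_inn
-- ===== SOURCE A (Python) =====
-- def find_match_inn(check: str, etal: str):
--     matches = []
--     for value in etal:
--         if value in check:
--           matches.append(f"Найдено совпадение: {value}")
--         else:
--           matches.append(f"Совпадений не найдено: {value}")
--     return matches
-- ===== SOURCE B (Python) =====
-- def find_match_inn(check: str, etal: str):
--     # Precompute, once, the set of all substrings of check whose length occurs among the
--     # patterns; each pattern is then answered by a single set lookup.
--     n = len(check)
--     lengths = {len(v) for v in etal}
--     subs = {check[i:i + L] for L in lengths for i in range(n - L + 1)}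
--     return [f"Найдено совпадение: {v}" if v in subs
--             else f"Совпадений не найдено: {v}" for v in etal]
-- ===== Notes on version B (the rewrite author's own statement) =====
-- stated objective: faster
-- what changed: Instead of running a fresh substring search over check for each pattern, B precomputes one set of all substrings of check whose length occurs among the patterns and answers each pattern by a single set-membership lookup.
import Mathlib
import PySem

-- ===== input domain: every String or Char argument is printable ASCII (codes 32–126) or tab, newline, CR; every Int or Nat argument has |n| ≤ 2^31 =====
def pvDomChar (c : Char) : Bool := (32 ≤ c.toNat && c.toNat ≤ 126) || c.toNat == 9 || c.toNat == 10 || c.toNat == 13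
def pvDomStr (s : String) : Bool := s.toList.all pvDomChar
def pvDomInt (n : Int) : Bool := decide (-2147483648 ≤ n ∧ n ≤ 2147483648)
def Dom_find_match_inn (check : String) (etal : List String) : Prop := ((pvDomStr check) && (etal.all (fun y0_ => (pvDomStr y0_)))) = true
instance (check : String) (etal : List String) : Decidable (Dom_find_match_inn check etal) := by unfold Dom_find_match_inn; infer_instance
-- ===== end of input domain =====

-- B precomputes, once, the set of all substrings of `check` whose length occurs among the
-- patterns; each pattern is then a single set lookup instead of a fresh substring search
-- (objective: faster; the per-pattern scan over check disappears when patterns share lengths).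

-- ===== PORT A =====
-- per-pattern loop: 'value in check' substring test, append one message per pattern
def find_match_inn (check : String) (etal : List String) : List String :=
  etal.foldl
    (fun ms value =>
      if PySem.Str.isIn value check then
        ms ++ ["Найдено совпадение: " ++ value]
      else
        ms ++ ["Совпадений не найдено: " ++ value])
    []

-- ===== PORT B =====
-- {check[i:i+L] for L in lengths for i in range(n - L + 1)} on the code-point lists
def pvSubsOfLengths (cs : List Char) (lengths : List Nat) : List (List Char) :=
  lengths.flatMap (fun L =>
    (List.range (cs.length - L + 1)).map (fun i : Nat =>
      PySem.List.slice cs (some (i : Int)) (some ((i : Int) + (L : Int)))))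

def find_match_inn_alt (check : String) (etal : List String) : List String :=
  let lengths : PySem.Set Nat := PySem.Set.ofList (etal.map (fun v => v.toList.length))
  let subs : PySem.Set (List Char) := PySem.Set.ofList (pvSubsOfLengths check.toList lengths)
  etal.map (fun v =>
    if PySem.Set.contains subs v.toList then "Найдено совпадение: " ++ v
    else "Совпадений не найдено: " ++ v)

-- ===== PRECONDITION & SPEC =====
def Spec_find_match_inn (check : String) (etal : List String) (out : List String) : Prop := out = find_match_inn_alt check etal
instance (check : String) (etal : List String) (out : List String) : Decidable (Spec_find_match_inn check etal out) := by unfold Spec_find_match_inn; infer_instance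

-- ===== CLAIM (what is proved, stated in full; the proofs are below) =====
def Claim_equal_find_match_inn : Prop := ∀ (check : String) (etal : List String), Dom_find_match_inn check etal → Spec_find_match_inn check etal (find_match_inn check etal)

-- ===== LEMMAS AND PROOFS =====

-- every collected slice is an infix of cs
lemma mem_pvSubsOfLengths_infix (cs v : List Char) (lengths : List Nat)
    (h : v ∈ pvSubsOfLengths cs lengths) : v <:+: cs := by
  unfold pvSubsOfLengths at h
  simp only [List.mem_flatMap, List.mem_map, List.mem_range] at h
  obtain ⟨L, _, i, _, rfl⟩ := h
  rw [PySem.List.slice_natCast_add]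
  exact ((List.take_prefix L _).isInfix).trans (List.drop_suffix i cs).isInfix

-- conversely, an infix whose length is collected is among the slices
lemma infix_mem_pvSubsOfLengths (cs v : List Char) (lengths : List Nat)
    (hL : v.length ∈ lengths) (h : v <:+: cs) : v ∈ pvSubsOfLengths cs lengths := by
  obtain ⟨pre, suf, rfl⟩ := h
  unfold pvSubsOfLengths
  simp only [List.mem_flatMap, List.mem_map, List.mem_range]
  refine ⟨v.length, hL, pre.length, by simp only [List.length_append]; omega, ?_⟩
  rw [PySem.List.slice_natCast_add, List.append_assoc, List.drop_left, List.take_left]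

-- for a pattern occurring in etal, B's set lookup equals A's substring test
lemma contains_eq_isIn (check v : String) (etal : List String) (hv : v ∈ etal) :
    PySem.Set.contains
      (PySem.Set.ofList (pvSubsOfLengths check.toList
        (PySem.Set.ofList (etal.map (fun v => v.toList.length))))) v.toList
      = PySem.Str.isIn v check := by
  rw [Bool.eq_iff_iff, PySem.Set.contains_iff, PySem.Set.mem_ofList, PySem.Str.isIn_iff_infix]
  constructor
  · exact mem_pvSubsOfLengths_infix _ _ _
  · refine infix_mem_pvSubsOfLengths _ _ _ ?_
    rw [PySem.Set.mem_ofList]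
    exact List.mem_map.mpr ⟨v, hv, rfl⟩

-- ===== VERDICT (by name: the statement is the Claim_ definition above) =====
theorem find_match_inn_spec : Claim_equal_find_match_inn := by
  intro check etal _
  unfold Spec_find_match_inn find_match_inn find_match_inn_alt
  have hfun : (fun (ms : List String) (value : String) =>
      if PySem.Str.isIn value check then ms ++ ["Найдено совпадение: " ++ value]
      else ms ++ ["Совпадений не найдено: " ++ value])
      = (fun ms value => ms ++ [if PySem.Str.isIn value check
          then "Найдено совпадение: " ++ value else "Совпадений не найдено: " ++ value]) := by
    funext ms value; split <;> rfl
  rw [hfun, PySem.List.foldl_append_singleton_eq_map, List.nil_append]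
  exact List.map_congr_left (fun v hv => by rw [contains_eq_isIn check v etal hv])
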